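-- pv_equiv track=rewrite | github.com/qifanyyy/JupyterNotebook | new_algs/Optimization+algorithms/Min+conflicts+algorithm/tabu.py | find_total_collisions
-- ===== SOURCE A (Python) =====
-- def find_total_collisions(connection_graph, color_graph):
--     no_collisions = 0
--     colliding = list()
--     for node in range(len(color_graph) - 1):
--         for j in range(node + 1, len(color_graph)):
--             #print 'node=',node,'j=',j,'link=',connection_graph[node][j],'colornode=',color_graph[node],'colorJ=',color_graph[j]
--             if(connection_graph[node][j] == 1):
--                 if(color_graph[node] == color_graph[j]):
--                     no_collisions += 1
--                     #print 'node ', node, 'collides with ',j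
--                     colliding.append(node) #nodes that collide
--     return no_collisions, colliding
-- ===== SOURCE B (Python) =====
-- def find_total_collisions(connection_graph, color_graph):
--     # Group node indices by color; only same-color pairs can collide.
--     buckets = {}
--     for i in range(len(color_graph)):
--         c = color_graph[i]
--         buckets[c] = buckets.get(c, []) + [i]
--     colliding = []
--     for nodes in buckets.values():
--         while len(nodes) > 1:
--             a = nodes[0]
--             nodes = nodes[1:]
--             for b in nodes:
--                 if connection_graph[a][b] == 1:
--                     colliding.append(a)
--     colliding.sort()
--     return len(colliding), colliding
-- ===== Notes on version B (the rewrite author's own statement) =====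
-- stated objective: alternative
-- what changed: Instead of scanning every pair (i,j) of nodes, B first builds a dict mapping each color to the ordered list of node indices holding it, emits a collision only for same-color pairs inside each bucket, and sorts the collected list to reproduce A's non-decreasing order.
import Mathlib
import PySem

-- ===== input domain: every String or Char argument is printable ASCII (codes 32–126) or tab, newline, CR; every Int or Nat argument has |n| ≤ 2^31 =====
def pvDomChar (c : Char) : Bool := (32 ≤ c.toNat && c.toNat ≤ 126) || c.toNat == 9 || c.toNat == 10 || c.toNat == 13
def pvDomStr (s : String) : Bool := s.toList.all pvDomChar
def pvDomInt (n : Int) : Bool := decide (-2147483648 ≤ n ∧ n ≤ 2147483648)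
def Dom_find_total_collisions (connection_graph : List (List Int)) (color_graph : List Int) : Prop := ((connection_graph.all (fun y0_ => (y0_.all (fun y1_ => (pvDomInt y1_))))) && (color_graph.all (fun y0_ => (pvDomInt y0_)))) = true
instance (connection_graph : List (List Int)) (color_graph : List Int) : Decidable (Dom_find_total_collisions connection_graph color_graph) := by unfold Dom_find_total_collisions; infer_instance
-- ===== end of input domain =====

-- B groups node indices by color and inspects only same-color pairs, then sorts; return value proved equal to A's (alternative decomposition, no speed claim).

-- B groups the node indices by color in a dict, inspects only same-color pairs inside each bucket, and sorts the collected list; the return value is proved equal to A's (alternative decomposition, no speed claim).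

-- ===== PORT A =====
def find_total_collisions (connection_graph : List (List Int)) (color_graph : List Int) : Int × List Int :=
  let n : Int := PySem.List.len color_graph
  (PySem.List.pyRange 0 (n - 1) 1).foldl (fun (st : Int × List Int) node =>
    (PySem.List.pyRange (node + 1) n 1).foldl (fun st j =>
      if PySem.List.pyGetD (PySem.List.pyGetD connection_graph node []) j 0 == 1 then
        if PySem.List.pyGetD color_graph node 0 == PySem.List.pyGetD color_graph j 0 then
          (st.1 + 1, st.2 ++ [node])
        else st
      else st) st) (0, [])

-- ===== PORT B =====
-- helper for Source B's 'while len(nodes) > 1: a = nodes[0]; nodes = nodes[1:]; for b in nodes: …'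
def pvBucketLoop (connection_graph : List (List Int)) (nodes : List Int) (acc : List Int) : List Int :=
  match nodes with
  | [] => acc
  | [_] => acc
  | a :: rest =>
      pvBucketLoop connection_graph rest
        (rest.foldl (fun acc b =>
          if PySem.List.pyGetD (PySem.List.pyGetD connection_graph a []) b 0 == 1 then acc ++ [a] else acc) acc)

def find_total_collisions_alt (connection_graph : List (List Int)) (color_graph : List Int) : Int × List Int :=
  let buckets : PySem.Dict Int (List Int) :=
    (PySem.List.pyRange 0 (PySem.List.len color_graph) 1).foldl
      (fun d i => d.modify (PySem.List.pyGetD color_graph i 0) [] (fun v => v ++ [i])) PySem.Dict.empty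
  let colliding : List Int :=
    buckets.values.foldl (fun acc nodes => pvBucketLoop connection_graph nodes acc) []
  let s := PySem.List.sorted colliding (fun x => x) false
  (PySem.List.len s, s)

-- ===== PRECONDITION & SPEC =====
-- Pre_ is exactly where Python A returns: A reads connection_graph[i][j] for every pair i < j < len(color_graph),
-- so every row i ≤ len-2 must exist and reach index len-1; otherwise A raises IndexError.
-- (Both ports are total through the pyGetD defaults, so the equality proof below holds unconditionally;
-- Pre_ only delimits the inputs on which the Python programs actually return.)
def Pre_find_total_collisions (connection_graph : List (List Int)) (color_graph : List Int) : Prop :=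
  ∀ i : Nat, i < color_graph.length - 1 →
    i < connection_graph.length ∧ color_graph.length ≤ (connection_graph.getD i []).length
instance (connection_graph : List (List Int)) (color_graph : List Int) : Decidable (Pre_find_total_collisions connection_graph color_graph) := by unfold Pre_find_total_collisions; infer_instance
def pvWitness_find_total_collisions : List (List Int) × List Int := ([[0, 1], [0, 0]], [1, 1])

def Spec_find_total_collisions (connection_graph : List (List Int)) (color_graph : List Int) (out : Int × List Int) : Prop := out = find_total_collisions_alt connection_graph color_graph
instance (connection_graph : List (List Int)) (color_graph : List Int) (out : Int × List Int) : Decidable (Spec_find_total_collisions connection_graph color_graph out) := by unfold Spec_find_total_collisions; infer_instance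

-- ===== CLAIM (what is proved, stated in full; the proofs are below) =====
def Claim_equal_find_total_collisions : Prop := ∀ (connection_graph : List (List Int)) (color_graph : List Int), Dom_find_total_collisions connection_graph color_graph → Pre_find_total_collisions connection_graph color_graph → Spec_find_total_collisions connection_graph color_graph (find_total_collisions connection_graph color_graph)

-- ===== LEMMAS AND PROOFS =====
def pvC (cg : List (List Int)) (a b : Int) : Bool :=
  PySem.List.pyGetD (PySem.List.pyGetD cg a []) b 0 == 1
def pvP (cg : List (List Int)) (col : List Int) (i j : Int) : Bool :=
  pvC cg i j && (PySem.List.pyGetD col i 0 == PySem.List.pyGetD col j 0)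
def pvListA (cg : List (List Int)) (col : List Int) : List Int :=
  (PySem.List.pyRange 0 ((col.length : Int) - 1) 1).flatMap (fun i =>
    ((PySem.List.pyRange (i + 1) (col.length : Int) 1).filter (fun j => pvP cg col i j)).map (fun _ => i))

def pvPairs (cg : List (List Int)) : List Int → List Int
  | [] => []
  | a :: rest => ((rest.filter (fun b => pvC cg a b)).map (fun _ => a)) ++ pvPairs cg rest

def pvBucket (col : List Int) (c : Int) : List Int :=
  (PySem.List.pyRange 0 (col.length : Int) 1).filter (fun i => PySem.List.pyGetD col i 0 == c)

theorem pvShapeA (cg : List (List Int)) (col : List Int) :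
    find_total_collisions cg col = (((pvListA cg col).length : Int), pvListA cg col) := by
  unfold find_total_collisions pvListA
  simp only [PySem.List.len_eq]
  have houter : ∀ (st : Int × List Int), ∀ node ∈ PySem.List.pyRange 0 ((col.length : Int) - 1) 1,
      (PySem.List.pyRange (node + 1) ((col.length : Int)) 1).foldl (fun st j =>
        if PySem.List.pyGetD (PySem.List.pyGetD cg node []) j 0 == 1 then
          if PySem.List.pyGetD col node 0 == PySem.List.pyGetD col j 0 then
            (st.1 + 1, st.2 ++ [node])
          else st
        else st) st
      = (st.1 + ((PySem.List.pyRange (node + 1) ((col.length : Int)) 1).countP (fun j => pvP cg col node j) : Int),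
         st.2 ++ ((PySem.List.pyRange (node + 1) ((col.length : Int)) 1).filter (fun j => pvP cg col node j)).map (fun _ => node)) := by
    intro st node _
    have hstep : (fun (st : Int × List Int) (j : Int) =>
        if PySem.List.pyGetD (PySem.List.pyGetD cg node []) j 0 == 1 then
          if PySem.List.pyGetD col node 0 == PySem.List.pyGetD col j 0 then
            (st.1 + 1, st.2 ++ [node]) else st
        else st)
      = fun st j => (if pvP cg col node j then st.1 + 1 else st.1,
                     if pvP cg col node j then st.2 ++ [node] else st.2) := by
      funext st j
      simp only [pvP, pvC]
      by_cases h1 : (PySem.List.pyGetD (PySem.List.pyGetD cg node []) j 0 == 1) = true <;>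
        by_cases h2 : (PySem.List.pyGetD col node 0 == PySem.List.pyGetD col j 0) = true <;>
        simp [h1, h2]
    rw [hstep]
    obtain ⟨a, b⟩ := st
    rw [PySem.List.foldl_prod_mk (f := fun (c : Int) j => if pvP cg col node j then c + 1 else c)
        (g := fun (l : List Int) j => if pvP cg col node j then l ++ [node] else l)]
    rw [PySem.List.foldl_if_add_one, PySem.List.foldl_append_if (f := fun _ => node)]
  rw [PySem.List.foldl_congr_mem _ _ _ _ houter]
  rw [PySem.List.foldl_prod_mk (f := fun (c : Int) node => c + ((PySem.List.pyRange (node + 1) ((col.length : Int)) 1).countP (fun j => pvP cg col node j) : Int))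
      (g := fun (l : List Int) node => l ++ ((PySem.List.pyRange (node + 1) ((col.length : Int)) 1).filter (fun j => pvP cg col node j)).map (fun _ => node))]
  rw [PySem.List.foldl_add, PySem.List.foldl_append_eq_flatMap]
  simp [List.length_flatMap, List.countP_eq_length_filter, Function.comp_def]

theorem pvBucketLoop_eq (cg : List (List Int)) (nodes acc : List Int) :
    pvBucketLoop cg nodes acc = acc ++ pvPairs cg nodes := by
  induction nodes generalizing acc with
  | nil => simp [pvBucketLoop, pvPairs]
  | cons a rest ih =>
    match rest with
    | [] => simp [pvBucketLoop, pvPairs]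
    | b :: rest' =>
      have hred : pvBucketLoop cg (a :: b :: rest') acc
          = pvBucketLoop cg (b :: rest')
            ((b :: rest').foldl (fun acc bb =>
              if PySem.List.pyGetD (PySem.List.pyGetD cg a []) bb 0 == 1 then acc ++ [a] else acc) acc) := rfl
      rw [hred, ih, PySem.List.foldl_append_if (p := fun b => PySem.List.pyGetD (PySem.List.pyGetD cg a []) b 0 == 1) (f := fun _ => a)]
      simp [pvPairs, pvC]

-- buckets characterization
theorem pvBuckets_getD (col : List Int) (c : Int) :
    ((PySem.List.pyRange 0 (col.length : Int) 1).foldl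
      (fun d i => d.modify (PySem.List.pyGetD col i 0) [] (fun v => v ++ [i])) PySem.Dict.empty).getD c []
    = pvBucket col c := by
  have hfold : List.foldl (fun (d : PySem.Dict Int (List Int)) (p : Int × Int) => d.modify p.1 [] (fun v => v ++ [p.2]))
      PySem.Dict.empty ((PySem.List.pyRange 0 (col.length : Int) 1).map (fun i => (PySem.List.pyGetD col i 0, i)))
      = (PySem.List.pyRange 0 (col.length : Int) 1).foldl
        (fun d i => d.modify (PySem.List.pyGetD col i 0) [] (fun v => v ++ [i])) PySem.Dict.empty := by
    rw [List.foldl_map]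
  rw [← hfold, PySem.Dict.getD_foldl_modify_append]
  simp [pvBucket, List.filter_map, Function.comp_def]

def pvRawB (cg : List (List Int)) (col : List Int) : List Int :=
  (PySem.Set.ofList ((PySem.List.pyRange 0 (col.length : Int) 1).map (fun i => PySem.List.pyGetD col i 0))).flatMap
    (fun c => pvPairs cg (pvBucket col c))

theorem pvShapeB (cg : List (List Int)) (col : List Int) :
    find_total_collisions_alt cg col =
      (((PySem.List.sorted (pvRawB cg col) (fun x => x) false).length : Int),
        PySem.List.sorted (pvRawB cg col) (fun x => x) false) := by
  have h0 : find_total_collisions_alt cg col =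
      (PySem.List.len (PySem.List.sorted (((PySem.List.pyRange 0 (col.length : Int) 1).foldl
          (fun d i => d.modify (PySem.List.pyGetD col i 0) [] (fun v => v ++ [i])) PySem.Dict.empty).values.foldl
            (fun acc nodes => pvBucketLoop cg nodes acc) []) (fun x => x) false),
       PySem.List.sorted (((PySem.List.pyRange 0 (col.length : Int) 1).foldl
          (fun d i => d.modify (PySem.List.pyGetD col i 0) [] (fun v => v ++ [i])) PySem.Dict.empty).values.foldl
            (fun acc nodes => pvBucketLoop cg nodes acc) []) (fun x => x) false) := by
    unfold find_total_collisions_alt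
    simp only [PySem.List.len]
  rw [h0]
  have hnodup : ((PySem.List.pyRange 0 (col.length : Int) 1).foldl
      (fun d i => d.modify (PySem.List.pyGetD col i 0) [] (fun v => v ++ [i])) PySem.Dict.empty).keys.Nodup :=
    PySem.Dict.nodup_keys_foldl_modify_key _ (fun i => PySem.List.pyGetD col i 0) ([] : List Int)
      (fun _ i v => v ++ [i]) PySem.Dict.empty List.nodup_nil
  have hkeys : ((PySem.List.pyRange 0 (col.length : Int) 1).foldl
      (fun d i => d.modify (PySem.List.pyGetD col i 0) [] (fun v => v ++ [i])) PySem.Dict.empty).keys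
      = PySem.Set.ofList ((PySem.List.pyRange 0 (col.length : Int) 1).map (fun i => PySem.List.pyGetD col i 0)) := by
    rw [PySem.Dict.keys_foldl_modify_key _ (fun i => PySem.List.pyGetD col i 0) ([] : List Int) (fun _ i v => v ++ [i])]
    exact PySem.Set.update_nil_left _
  have hloop : ∀ (acc : List Int) (l : List (List Int)),
      l.foldl (fun acc nodes => pvBucketLoop cg nodes acc) acc = acc ++ l.flatMap (pvPairs cg) := by
    intro acc l
    rw [PySem.List.foldl_congr_mem l _ (fun acc nodes => acc ++ pvPairs cg nodes) acc (fun acc x _ => pvBucketLoop_eq cg x acc)]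
    exact PySem.List.foldl_append_eq_flatMap _ _ _
  rw [PySem.Dict.values_eq_map_keys _ hnodup ([] : List Int), hkeys, hloop, List.nil_append, List.flatMap_map]
  have hb : (fun c => pvPairs cg (((PySem.List.pyRange 0 (col.length : Int) 1).foldl
      (fun d i => d.modify (PySem.List.pyGetD col i 0) [] (fun v => v ++ [i])) PySem.Dict.empty).getD c []))
      = fun c => pvPairs cg (pvBucket col c) := by
    funext c; rw [pvBuckets_getD col c]
  rw [hb, PySem.List.len_eq]
  rfl

theorem pvSumIf {α : Type} [DecidableEq α] (l : List α) (hnd : l.Nodup) (v : α) (h : α → Nat) :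
    (l.map (fun c => if c = v then h c else 0)).sum = if v ∈ l then h v else 0 := by
  induction l with
  | nil => simp
  | cons a t ih =>
    have hnd' := (List.nodup_cons.mp hnd).2
    have hna := (List.nodup_cons.mp hnd).1
    by_cases hav : a = v
    · subst hav
      have ht : (t.map (fun c => if c = a then h c else 0)).sum = 0 := by
        rw [ih hnd']
        simp [hna]
      simp [ht]
    · simp only [List.map_cons, List.sum_cons, if_neg hav, ih hnd', List.mem_cons]
      have : ¬ v = a := fun hh => hav hh.symm
      simp [this]

theorem pvCountConstMap {v i : Int} (L : List Int) :
    (L.map (fun _ => i)).count v = if i = v then L.length else 0 := by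
  by_cases h : i = v
  · subst h; simp [List.map_const']
  · rw [if_neg h, List.count_eq_zero]
    intro hm
    obtain ⟨_, _, hx⟩ := List.mem_map.mp hm
    exact h hx

theorem pvCountA (cg : List (List Int)) (col : List Int) (v : Int) :
    (pvListA cg col).count v =
      if 0 ≤ v ∧ v < (col.length : Int) then
        (PySem.List.pyRange (v + 1) (col.length : Int) 1).countP (fun j => pvP cg col v j)
      else 0 := by
  unfold pvListA
  rw [List.count_flatMap]
  have hterm : ∀ i : Int, (List.count v ∘ fun i =>
      ((PySem.List.pyRange (i + 1) (col.length : Int) 1).filter (fun j => pvP cg col i j)).map (fun _ => i)) i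
      = (fun i => if i = v then ((PySem.List.pyRange (i + 1) (col.length : Int) 1).filter (fun j => pvP cg col i j)).length else 0) i := by
    intro i
    simp only [Function.comp_apply]
    exact pvCountConstMap _
  rw [List.map_congr_left (fun i _ => hterm i)]
  rw [pvSumIf _ (PySem.List.nodup_pyRange_one 0 ((col.length : Int) - 1)) v]
  rw [List.countP_eq_length_filter]
  by_cases h2 : 0 ≤ v ∧ v < (col.length : Int)
  · rw [if_pos h2]
    by_cases h1 : v ∈ PySem.List.pyRange 0 ((col.length : Int) - 1) 1
    · rw [if_pos h1]
    · rw [if_neg h1]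
      have hv : (col.length : Int) ≤ v + 1 := by
        have hne : ¬ (0 ≤ v ∧ v < (col.length : Int) - 1) := fun hc => h1 (PySem.List.mem_pyRange_one.mpr hc)
        omega
      rw [PySem.List.pyRange_one_eq_nil hv]
      simp
  · rw [if_neg h2]
    have h1 : v ∉ PySem.List.pyRange 0 ((col.length : Int) - 1) 1 := fun hm => by
      have := PySem.List.mem_pyRange_one.mp hm
      omega
    rw [if_neg h1]

theorem pvPairsCount (cg : List (List Int)) (v : Int) (nodes : List Int)
    (hnd : nodes.Nodup) (hsort : nodes.Pairwise (· < ·)) :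
    (pvPairs cg nodes).count v =
      if v ∈ nodes then (nodes.filter (fun b => decide (v < b))).countP (fun b => pvC cg v b) else 0 := by
  induction nodes with
  | nil => simp [pvPairs]
  | cons a rest ih =>
    have hnd' := (List.nodup_cons.mp hnd).2
    have hna := (List.nodup_cons.mp hnd).1
    have hlt : ∀ b ∈ rest, a < b := fun b hb => List.rel_of_pairwise_cons hsort hb
    have hsort' := hsort.of_cons
    rw [pvPairs, List.count_append, pvCountConstMap, ih hnd' hsort']
    by_cases hav : a = v
    · subst hav
      rw [if_pos rfl, if_neg hna, if_pos (List.mem_cons_self)]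
      have h1 : decide (a < a) = false := by simp
      rw [List.filter_cons, h1]
      have h2 : rest.filter (fun b => decide (a < b)) = rest :=
        List.filter_eq_self.mpr (fun b hb => by simpa using hlt b hb)
      rw [h2, List.countP_eq_length_filter]
      simp
    · rw [if_neg hav, Nat.zero_add]
      by_cases hvr : v ∈ rest
      · rw [if_pos hvr, if_pos (List.mem_cons_of_mem a hvr)]
        have hva : decide (v < a) = false := by
          have := hlt v hvr; simp; omega
        rw [List.filter_cons, hva]
        simp
      · rw [if_neg hvr, if_neg (by simp [hvr]; exact fun h => hav h.symm)]

theorem pvCountB (cg : List (List Int)) (col : List Int) (v : Int) :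
    (pvRawB cg col).count v = (pvListA cg col).count v := by
  rw [pvCountA, pvRawB, List.count_flatMap]
  set key : Int → Int := fun i => PySem.List.pyGetD col i 0 with hkey
  set R := PySem.List.pyRange 0 (col.length : Int) 1 with hR
  have hbn : ∀ c, (pvBucket col c).Nodup := fun c => (PySem.List.nodup_pyRange_one _ _).filter _
  have hbs : ∀ c, (pvBucket col c).Pairwise (· < ·) := fun c => (PySem.List.pairwise_lt_pyRange_one _ _).filter _
  have hmb : ∀ c, v ∈ pvBucket col c ↔ (0 ≤ v ∧ v < (col.length : Int)) ∧ key v = c := by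
    intro c
    unfold pvBucket
    rw [List.mem_filter, PySem.List.mem_pyRange_one]
    constructor
    · rintro ⟨⟨h1, h2⟩, h3⟩; exact ⟨⟨h1, h2⟩, by simpa using h3⟩
    · rintro ⟨⟨h1, h2⟩, h3⟩; exact ⟨⟨h1, h2⟩, by simpa using h3⟩
  by_cases hin : 0 ≤ v ∧ v < (col.length : Int)
  · rw [if_pos hin]
    have hterm : ∀ c ∈ PySem.Set.ofList (R.map key),
        (List.count v ∘ fun c => pvPairs cg (pvBucket col c)) c
        = (fun c => if c = key v then ((pvBucket col c).filter (fun b => decide (v < b))).countP (fun b => pvC cg v b) else 0) c := by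
      intro c _
      simp only [Function.comp_apply]
      rw [pvPairsCount cg v _ (hbn c) (hbs c)]
      by_cases hc : c = key v
      · rw [if_pos ((hmb c).mpr ⟨hin, hc.symm⟩), if_pos hc]
      · rw [if_neg (fun hm => hc (((hmb c).mp hm).2.symm)), if_neg hc]
    rw [List.map_congr_left hterm]
    rw [pvSumIf (PySem.Set.ofList (List.map key R)) (PySem.Set.nodup_ofList _) (key v)
        (fun c => List.countP (fun b => pvC cg v b) (List.filter (fun b => decide (v < b)) (pvBucket col c)))]
    have hkv : key v ∈ PySem.Set.ofList (R.map key) := by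
      rw [PySem.Set.mem_ofList]
      exact List.mem_map_of_mem (PySem.List.mem_pyRange_one.mpr hin)
    rw [if_pos hkv]
    -- (bucket (key v)).filter (v < ·) vs pyRange (v+1) len filtered
    have hsplit : R = PySem.List.pyRange 0 (v + 1) 1 ++ PySem.List.pyRange (v + 1) (col.length : Int) 1 :=
      PySem.List.pyRange_one_append 0 (v + 1) _ (by omega) (by omega)
    have hbucket : (pvBucket col (key v)).filter (fun b => decide (v < b))
        = (PySem.List.pyRange (v + 1) (col.length : Int) 1).filter
            (fun i => decide (v < i) && (PySem.List.pyGetD col i 0 == key v)) := by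
      unfold pvBucket
      rw [← hR, List.filter_filter, hsplit, List.filter_append]
      have h1 : (PySem.List.pyRange 0 (v + 1) 1).filter
          (fun i => decide (v < i) && (PySem.List.pyGetD col i 0 == key v)) = [] := by
        rw [List.filter_eq_nil_iff]
        intro x hx
        have := PySem.List.mem_pyRange_one.mp hx
        simp
        intro h
        omega
      rw [h1, List.nil_append]
    rw [hbucket, List.countP_filter]
    refine List.countP_congr (fun j hj => ?_)
    have hmem := PySem.List.mem_pyRange_one.mp hj
    have h2 : decide (v < j) = true := by simp; omega
    rw [h2]
    simp only [pvP, pvC, Bool.true_and, Bool.and_eq_true, beq_iff_eq, hkey]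
    constructor
    · rintro ⟨x, y⟩; exact ⟨x, y.symm⟩
    · rintro ⟨x, y⟩; exact ⟨x, y.symm⟩
  · rw [if_neg hin]
    have hterm : ∀ c ∈ PySem.Set.ofList (R.map key),
        (List.count v ∘ fun c => pvPairs cg (pvBucket col c)) c = 0 := by
      intro c _
      simp only [Function.comp_apply]
      rw [pvPairsCount cg v _ (hbn c) (hbs c), if_neg (fun hm => hin ((hmb c).mp hm).1)]
    rw [List.map_congr_left hterm]
    simp

theorem pvFlatPairwise (l : List Int) (f : Int → List Int)
    (hl : l.Pairwise (· < ·)) (hf : ∀ i, ∀ x ∈ f i, x = i) :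
    (l.flatMap f).Pairwise (· ≤ ·) := by
  induction l with
  | nil => simp
  | cons a t ih =>
    rw [List.flatMap_cons, List.pairwise_append]
    refine ⟨?_, ih hl.of_cons, ?_⟩
    · exact List.pairwise_of_forall_mem_list (fun x hx y hy => by
        rw [hf a x hx, hf a y hy])
    · intro x hx y hy
      obtain ⟨b, hb, hyb⟩ := List.mem_flatMap.mp hy
      rw [hf a x hx, hf b y hyb]
      exact le_of_lt (List.rel_of_pairwise_cons hl hb)

theorem pvListA_pairwise (cg : List (List Int)) (col : List Int) :
    (pvListA cg col).Pairwise (· ≤ ·) := by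
  unfold pvListA
  refine pvFlatPairwise _ _ (PySem.List.pairwise_lt_pyRange_one _ _) ?_
  intro i x hx
  obtain ⟨_, _, hx⟩ := List.mem_map.mp hx
  exact hx.symm

theorem pv_spec (cg : List (List Int)) (col : List Int) :
    find_total_collisions cg col = find_total_collisions_alt cg col := by
  have hsort : PySem.List.sorted (pvRawB cg col) (fun x => x) false = pvListA cg col := by
    refine List.Perm.eq_of_pairwise (fun a b _ _ h1 h2 => le_antisymm h1 h2) ?_ (pvListA_pairwise cg col) ?_
    · exact PySem.List.sorted_pairwise _ _
    · exact (PySem.List.sorted_perm _ _ _).trans (List.perm_iff_count.mpr (pvCountB cg col))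
  rw [pvShapeA, pvShapeB, hsort]

-- ===== VERDICT (by name: the statement is the Claim_ definition above) =====
theorem find_total_collisions_spec : Claim_equal_find_total_collisions := by
  intro cg col _ _
  show find_total_collisions cg col = find_total_collisions_alt cg col
  exact pv_spec cg col
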